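-- pv_equiv track=rewrite | github.com/vishnudk/OA2021B3 | b_Majority/solutionPython.py | function
-- ===== SOURCE A (Python) =====
-- def function(str , l):
--    max = -1
--    for i in str:
--       if str.count(i) > max:
--          max =  str.count(i)
--    if max > len(str)/2:
--       return max
--    return -1
-- ===== SOURCE B (Python) =====
-- def function(str, l):
--     # Boyer-Moore majority vote: one pass to elect a candidate, then one
--     # verification count; return the count if it is a strict majority, else -1.
--     cand = None
--     cnt = 0
--     for ch in str:
--         if cnt == 0:
--             cand = ch
--             cnt = 1
--         elif ch == cand:
--             cnt += 1
--         else: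
--             cnt -= 1
--     if cand is None:
--         return -1
--     c = str.count(cand)
--     if 2 * c > len(str):
--         return c
--     return -1
-- ===== Notes on version B (the rewrite author's own statement) =====
-- stated objective: faster
-- what changed: B replaces A's per-position str.count scans (quadratic max-frequency search) by Boyer-Moore majority voting: one pass electing a candidate with a counter, then a single verification count of that candidate; the float comparison max > len/2 becomes the exact integer test 2*c > len.
import Mathlib
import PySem

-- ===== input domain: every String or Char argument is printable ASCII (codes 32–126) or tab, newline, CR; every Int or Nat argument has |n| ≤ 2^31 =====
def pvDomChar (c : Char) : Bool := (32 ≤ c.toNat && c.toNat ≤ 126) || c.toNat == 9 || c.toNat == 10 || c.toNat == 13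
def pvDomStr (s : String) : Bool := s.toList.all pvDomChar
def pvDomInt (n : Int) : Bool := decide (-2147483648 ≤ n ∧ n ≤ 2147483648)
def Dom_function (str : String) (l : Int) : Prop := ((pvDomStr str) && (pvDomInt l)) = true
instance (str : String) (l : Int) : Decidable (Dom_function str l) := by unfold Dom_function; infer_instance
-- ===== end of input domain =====

-- B replaces A's quadratic per-position str.count scans by Boyer-Moore majority
-- voting (one candidate/counter pass + one verification count); objective: faster.

-- ===== PORT A =====
-- Python's 'max > len(str)/2' compares an int against the float len/2; for a nonnegative
-- int max and len ≤ 2^31 this is exactly the integer test 2*max > len, ported as such.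
def function (str : String) (l : Int) : Int :=
  let s := str.toList
  let mx := s.foldl (fun mx i =>
    if (PySem.Chars.count s [i] : Int) > mx then (PySem.Chars.count s [i] : Int) else mx) (-1)
  if 2 * mx > (s.length : Int) then mx else -1

-- ===== PORT B =====
-- one Boyer-Moore voting step: state = (candidate, counter)
def bmStep (st : Option Char × Int) (ch : Char) : Option Char × Int :=
  if st.2 = 0 then (some ch, 1)
  else if some ch = st.1 then (st.1, st.2 + 1)
  else (st.1, st.2 - 1)

-- Source B's str.count(cand) of a single char is List.count (exact: no overlap issues);
-- its '2 * c > len(str)' integer test is ported as written.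
def function_alt (str : String) (l : Int) : Int :=
  let s := str.toList
  let st := s.foldl bmStep (none, 0)
  match st.1 with
  | none => -1
  | some c =>
      let cnt : Int := (s.count c : Int)
      if 2 * cnt > (s.length : Int) then cnt else -1

-- ===== PRECONDITION & SPEC =====
def Spec_function (str : String) (l : Int) (out : Int) : Prop := out = function_alt str l
instance (str : String) (l : Int) (out : Int) : Decidable (Spec_function str l out) := by unfold Spec_function; infer_instance

-- ===== CLAIM (what is proved, stated in full; the proofs are below) =====
def Claim_equal_function : Prop := ∀ (str : String) (l : Int), Dom_function str l → Spec_function str l (function str l)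

-- ===== LEMMAS AND PROOFS =====

-- Python str.count with a single-character needle is the character count.
theorem countGo_single (c : Char) : ∀ (l : List Char) (fuel acc : Nat), l.length ≤ fuel →
    PySem.Chars.count.go [c] fuel l acc = acc + l.count c := by
  intro l
  induction l with
  | nil => intro fuel acc h; cases fuel <;> simp [PySem.Chars.count.go]
  | cons x t ih =>
    intro fuel acc h
    cases fuel with
    | zero => simp at h
    | succ f =>
      have ht : t.length ≤ f := by simpa using h
      rw [PySem.Chars.count.go]
      by_cases hx : x = c
      · subst hx
        rw [if_pos (by simp [List.isPrefixOf])]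
        simp only [List.length_cons, List.drop_succ_cons, List.drop_zero, List.length_nil]
        rw [ih f (acc + 1) ht]
        simp
        omega
      · rw [if_neg (by simp [List.isPrefixOf]; exact fun hc => (hx hc.symm).elim)]
        rw [ih f acc ht]
        simp [hx]

theorem count_single (s : List Char) (c : Char) : PySem.Chars.count s [c] = s.count c := by
  rw [PySem.Chars.count]
  simp [countGo_single c s s.length 0 le_rfl]

-- A's running-max loop body is 'max'.
theorem foldl_if_gt_eq_max_map {α : Type} (f : α → Int) :
    ∀ (l : List α) (a : Int),
    l.foldl (fun mx i => if f i > mx then f i else mx) a = (l.map f).foldl max a := by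
  intro l
  induction l with
  | nil => intro a; rfl
  | cons x t ih =>
    intro a
    simp only [List.foldl_cons, List.map_cons, ih]
    congr 1
    rcases lt_or_ge a (f x) with h | h
    · simp [h, max_eq_right (le_of_lt h)]
    · simp [not_lt.mpr h, max_eq_left h]

theorem foldl_max_eq_init_or_mem (l : List Int) : ∀ (a : Int),
    l.foldl max a = a ∨ l.foldl max a ∈ l := by
  induction l with
  | nil => intro a; left; rfl
  | cons x t ih =>
    intro a
    simp only [List.foldl_cons]
    rcases ih (max a x) with h | h
    · rcases max_cases a x with ⟨he, _⟩ | ⟨he, _⟩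
      · left; rw [h, he]
      · right; rw [h, he]; exact List.mem_cons_self
    · right; exact List.mem_cons_of_mem _ h

-- pairing potential of the Boyer-Moore state for a character x
def bmBound (x : Char) (st : Option Char × Int) : Int :=
  2 * (if some x = st.1 then st.2 else 0) - st.2

-- loop invariant of the voting pass
theorem bm_inv (s : List Char) : ∀ st : Option Char × Int, 0 ≤ st.2 →
    0 ≤ (s.foldl bmStep st).2 ∧
    ∀ x : Char, 2 * (s.count x : Int) + bmBound x st
      ≤ (s.length : Int) + bmBound x (s.foldl bmStep st) := by
  induction s with
  | nil => intro st h; exact ⟨h, fun x => by simp⟩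
  | cons ch t ih =>
    intro st h
    have h' : 0 ≤ (bmStep st ch).2 := by
      unfold bmStep; split_ifs <;> simp <;> omega
    obtain ⟨h1, h2⟩ := ih (bmStep st ch) h'
    refine ⟨by simpa using h1, ?_⟩
    intro x
    have hx := h2 x
    have hstep : 2 * (if x = ch then (1:Int) else 0) + bmBound x st
        ≤ 1 + bmBound x (bmStep st ch) := by
      unfold bmStep bmBound
      by_cases hxc : x = ch <;> split_ifs <;> simp_all <;> omega
    simp only [List.foldl_cons]
    by_cases hxc : x = ch
    · subst hxc
      rw [if_pos rfl] at hstep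
      have hc2 : ((x :: t).count x : Int) = (t.count x : Int) + 1 := by
        push_cast [List.count_cons_self]; ring
      push_cast [List.length_cons]
      omega
    · rw [if_neg hxc] at hstep
      have hc2 : ((ch :: t).count x : Int) = (t.count x : Int) := by
        simp [List.count_cons]
        exact fun h => hxc h.symm
      push_cast [List.length_cons]
      omega

-- ===== VERDICT (by name: the statement is the Claim_ definition above) =====
theorem function_spec : Claim_equal_function := by
  intro str l _
  unfold Spec_function function function_alt
  set s := str.toList with hs
  simp only [count_single]
  rw [foldl_if_gt_eq_max_map (fun i => ((s.count i : Int))) s (-1)]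
  set mx := (s.map fun i => ((s.count i : Int))).foldl max (-1) with hmx
  obtain ⟨hpos, hinv⟩ := bm_inv s (none, 0) le_rfl
  set st := s.foldl bmStep (none, 0) with hst
  have hn0 : (0:Int) ≤ (s.length : Int) := Int.natCast_nonneg _
  have hinv' : ∀ x : Char, some x ≠ st.1 → 2 * (s.count x : Int) ≤ (s.length : Int) := by
    intro x hxne
    have h := hinv x
    simp only [bmBound, if_neg hxne] at h
    have : (if some x = (none : Option Char) then (0:Int) else 0) = 0 := by simp
    simp at h
    omega
  have hub : ∀ x ∈ s, (s.count x : Int) ≤ mx := by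
    intro x hxs
    exact (PySem.List.le_foldl_max _ _).2 _ (List.mem_map_of_mem hxs)
  by_cases hgt : 2 * mx > (s.length : Int)
  · rw [if_pos hgt]
    have hattain := foldl_max_eq_init_or_mem (s.map fun i => ((s.count i : Int))) (-1)
    rw [← hmx] at hattain
    have hne : mx ≠ -1 := by omega
    obtain ⟨x, hxs, hxm⟩ := List.mem_map.mp (hattain.resolve_left hne)
    have hcand : some x = st.1 := by
      by_contra hc
      have := hinv' x hc
      omega
    rw [← hcand]
    simp only []
    rw [hxm, if_pos (by omega)]
  · rw [if_neg hgt]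
    rcases hcand : st.1 with _ | c
    · rfl
    · simp only []
      have hle : 2 * (s.count c : Int) ≤ (s.length : Int) := by
        by_cases hcs : c ∈ s
        · have := hub c hcs; omega
        · rw [List.count_eq_zero_of_not_mem hcs]; push_cast; omega
      rw [if_neg (by omega)]
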